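-- pv_equiv track=rewrite | github.com/kw5t45/Battleships | map_replacement_and_ship_validation.py | convert_ships_and_notations_dictionary_to_ship_names_and_notations
-- ===== SOURCE A (Python) =====
-- def convert_ships_and_notations_dictionary_to_ship_names_and_notations(dic):
--     output = {'Carrier': [], 'Battleship': [], 'Cruiser': [], 'Submarine': [], 'Destroyer': []}
--     one_three_length_in_output = False
--     for ship in dic:
--         if len(dic[ship]) == 5:
--             output['Carrier'] = dic[ship]
--         elif len(dic[ship]) == 4:
--             output['Battleship'] = dic[ship]
--         elif len(dic[ship]) == 3 and one_three_length_in_output == True: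
--             output['Cruiser'] = dic[ship]
--
--         elif len(dic[ship]) == 3:
--             output['Submarine'] = dic[ship]
--             one_three_length_in_output = True
--         elif len(dic[ship]) == 2:
--             output['Destroyer'] = dic[ship]
--     return output
-- ===== SOURCE B (Python) =====
-- def convert_ships_and_notations_dictionary_to_ship_names_and_notations(dic):
--     # Two-phase: group the ship notations by length, then assign each slot once.
--     vals = list(dic.values())
--     fives = [v for v in vals if len(v) == 5]
--     fours = [v for v in vals if len(v) == 4]
--     threes = [v for v in vals if len(v) == 3]
--     twos = [v for v in vals if len(v) == 2]
--     return {
--         'Carrier': fives[-1] if fives else [],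
--         'Battleship': fours[-1] if fours else [],
--         'Cruiser': threes[-1] if len(threes) >= 2 else [],
--         'Submarine': threes[0] if threes else [],
--         'Destroyer': twos[-1] if twos else [],
--     }
-- ===== Notes on version B (the rewrite author's own statement) =====
-- stated objective: simpler
-- what changed: Replaces A's single stateful loop (with a one_three_length_in_output flag and last-wins overwrites) by a two-phase group-then-assign: filter the values by length once, then fill each named slot directly (last of fives/fours/twos, first length-3 to Submarine, last length-3 to Cruiser only when there are at least two).
import Mathlib
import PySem

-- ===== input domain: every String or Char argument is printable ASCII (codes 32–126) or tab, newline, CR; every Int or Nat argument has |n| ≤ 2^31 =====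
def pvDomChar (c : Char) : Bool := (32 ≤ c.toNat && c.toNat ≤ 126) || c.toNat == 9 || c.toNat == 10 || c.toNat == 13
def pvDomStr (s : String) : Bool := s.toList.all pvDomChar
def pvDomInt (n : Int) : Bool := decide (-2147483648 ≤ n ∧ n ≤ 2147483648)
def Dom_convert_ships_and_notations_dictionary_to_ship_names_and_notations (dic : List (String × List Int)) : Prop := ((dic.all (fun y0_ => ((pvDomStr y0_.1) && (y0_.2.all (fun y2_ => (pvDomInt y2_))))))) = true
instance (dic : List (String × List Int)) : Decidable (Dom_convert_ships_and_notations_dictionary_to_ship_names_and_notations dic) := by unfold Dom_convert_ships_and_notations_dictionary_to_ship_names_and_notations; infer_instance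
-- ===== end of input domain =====

-- B replaces A's single stateful loop by a group-by-length-then-assign two-phase shape (objective: simpler; same cost).

-- ===== PORT A =====
-- The loop body: Python's `for ship in dic: … dic[ship] …` iterates the dict's entries
-- (a dict's keys are distinct, so `dic[ship]` is the value of the current entry).
def pvStepA (st : PySem.Dict String (List Int) × Bool) (p : String × List Int) :
    PySem.Dict String (List Int) × Bool :=
  if p.2.length = 5 then (st.1.insert "Carrier" p.2, st.2)
  else if p.2.length = 4 then (st.1.insert "Battleship" p.2, st.2)
  else if p.2.length = 3 ∧ st.2 = true then (st.1.insert "Cruiser" p.2, st.2)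
  else if p.2.length = 3 then (st.1.insert "Submarine" p.2, true)
  else if p.2.length = 2 then (st.1.insert "Destroyer" p.2, st.2)
  else st

def convert_ships_and_notations_dictionary_to_ship_names_and_notations (dic : List (String × List Int)) : List (String × List Int) :=
  let output : PySem.Dict String (List Int) :=
    PySem.Dict.ofList [("Carrier", []), ("Battleship", []), ("Cruiser", []), ("Submarine", []), ("Destroyer", [])]
  (dic.foldl pvStepA (output, false)).1.items

-- ===== PORT B =====
def convert_ships_and_notations_dictionary_to_ship_names_and_notations_alt (dic : List (String × List Int)) : List (String × List Int) :=
  let vals := dic.map (·.2)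
  let fives := vals.filter (fun v => v.length == 5)
  let fours := vals.filter (fun v => v.length == 4)
  let threes := vals.filter (fun v => v.length == 3)
  let twos := vals.filter (fun v => v.length == 2)
  [("Carrier", fives.getLast?.getD []),          -- fives[-1] if fives else []
   ("Battleship", fours.getLast?.getD []),
   ("Cruiser", if threes.length ≥ 2 then threes.getLast?.getD [] else []),
   ("Submarine", threes.head?.getD []),          -- threes[0] if threes else []
   ("Destroyer", twos.getLast?.getD [])]

-- ===== PRECONDITION & SPEC =====
def Spec_convert_ships_and_notations_dictionary_to_ship_names_and_notations (dic : List (String × List Int)) (out : List (String × List Int)) : Prop := out = convert_ships_and_notations_dictionary_to_ship_names_and_notations_alt dic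
instance (dic : List (String × List Int)) (out : List (String × List Int)) : Decidable (Spec_convert_ships_and_notations_dictionary_to_ship_names_and_notations dic out) := by unfold Spec_convert_ships_and_notations_dictionary_to_ship_names_and_notations; infer_instance

-- ===== CLAIM (what is proved, stated in full; the proofs are below) =====
def Claim_equal_convert_ships_and_notations_dictionary_to_ship_names_and_notations : Prop := ∀ (dic : List (String × List Int)), Dom_convert_ships_and_notations_dictionary_to_ship_names_and_notations dic → Spec_convert_ships_and_notations_dictionary_to_ship_names_and_notations dic (convert_ships_and_notations_dictionary_to_ship_names_and_notations dic)

-- ===== LEMMAS AND PROOFS =====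

-- What A's loop does to the (concretely shaped) state, as a function of the remaining list.
def pvLastD (xs : List (List Int)) (dflt : List Int) : List Int := xs.getLast?.getD dflt

def pvThrees (l : List (String × List Int)) : List (List Int) :=
  (l.map (·.2)).filter (fun v => v.length == 3)

lemma pvLastD_cons (x : List Int) (xs : List (List Int)) (c : List Int) :
    pvLastD (x :: xs) c = pvLastD xs x := by
  cases xs with
  | nil => rfl
  | cons y t =>
    unfold pvLastD
    rw [List.getLast?_cons_cons]
    cases h : (y :: t).getLast? with
    | none => simp at h
    | some z => rfl

lemma pvLoopA (l : List (String × List Int)) (c b cr s d : List Int) (flag : Bool) :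
    l.foldl pvStepA (PySem.Dict.mk [("Carrier", c), ("Battleship", b), ("Cruiser", cr), ("Submarine", s), ("Destroyer", d)], flag)
    = (PySem.Dict.mk
        [("Carrier", pvLastD ((l.map (·.2)).filter (fun v => v.length == 5)) c),
         ("Battleship", pvLastD ((l.map (·.2)).filter (fun v => v.length == 4)) b),
         ("Cruiser", if flag then pvLastD (pvThrees l) cr
                     else match pvThrees l with | [] => cr | _ :: t => pvLastD t cr),
         ("Submarine", if flag then s else (pvThrees l).head?.getD s),
         ("Destroyer", pvLastD ((l.map (·.2)).filter (fun v => v.length == 2)) d)],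
       flag || !(pvThrees l).isEmpty) := by
  induction l generalizing c b cr s d flag with
  | nil => cases flag <;> simp [pvThrees, pvLastD]
  | cons p rest ih =>
    rw [List.foldl_cons]
    by_cases h5 : p.2.length = 5
    · rw [show pvStepA (PySem.Dict.mk [("Carrier", c), ("Battleship", b), ("Cruiser", cr), ("Submarine", s), ("Destroyer", d)], flag) p
            = (PySem.Dict.mk [("Carrier", p.2), ("Battleship", b), ("Cruiser", cr), ("Submarine", s), ("Destroyer", d)], flag) from by
          unfold pvStepA; rw [if_pos h5]; rfl]
      rw [ih]
      simp [pvThrees, h5, pvLastD_cons]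
    · by_cases h4 : p.2.length = 4
      · rw [show pvStepA (PySem.Dict.mk [("Carrier", c), ("Battleship", b), ("Cruiser", cr), ("Submarine", s), ("Destroyer", d)], flag) p
              = (PySem.Dict.mk [("Carrier", c), ("Battleship", p.2), ("Cruiser", cr), ("Submarine", s), ("Destroyer", d)], flag) from by
            unfold pvStepA; rw [if_neg h5, if_pos h4]; rfl]
        rw [ih]
        simp [pvThrees, h4, pvLastD_cons]
      · by_cases h3 : p.2.length = 3
        · cases flag with
          | true =>
            rw [show pvStepA (PySem.Dict.mk [("Carrier", c), ("Battleship", b), ("Cruiser", cr), ("Submarine", s), ("Destroyer", d)], true) p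
                  = (PySem.Dict.mk [("Carrier", c), ("Battleship", b), ("Cruiser", p.2), ("Submarine", s), ("Destroyer", d)], true) from by
                unfold pvStepA; rw [if_neg h5, if_neg h4, if_pos ⟨h3, rfl⟩]; rfl]
            rw [ih]
            simp [pvThrees, h3, pvLastD_cons]
          | false =>
            rw [show pvStepA (PySem.Dict.mk [("Carrier", c), ("Battleship", b), ("Cruiser", cr), ("Submarine", s), ("Destroyer", d)], false) p
                  = (PySem.Dict.mk [("Carrier", c), ("Battleship", b), ("Cruiser", cr), ("Submarine", p.2), ("Destroyer", d)], true) from by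
                unfold pvStepA; rw [if_neg h5, if_neg h4, if_neg (by simp), if_pos h3]; rfl]
            rw [ih]
            simp [pvThrees, h3]
        · by_cases h2 : p.2.length = 2
          · rw [show pvStepA (PySem.Dict.mk [("Carrier", c), ("Battleship", b), ("Cruiser", cr), ("Submarine", s), ("Destroyer", d)], flag) p
                  = (PySem.Dict.mk [("Carrier", c), ("Battleship", b), ("Cruiser", cr), ("Submarine", s), ("Destroyer", p.2)], flag) from by
                unfold pvStepA; rw [if_neg h5, if_neg h4, if_neg (by simp [h3]), if_neg h3, if_pos h2]; rfl]
            rw [ih]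
            simp [pvThrees, h2, pvLastD_cons]
          · rw [show pvStepA (PySem.Dict.mk [("Carrier", c), ("Battleship", b), ("Cruiser", cr), ("Submarine", s), ("Destroyer", d)], flag) p
                  = (PySem.Dict.mk [("Carrier", c), ("Battleship", b), ("Cruiser", cr), ("Submarine", s), ("Destroyer", d)], flag) from by
                unfold pvStepA; rw [if_neg h5, if_neg h4, if_neg (by simp [h3]), if_neg h3, if_neg h2]]
            rw [ih]
            simp [pvThrees, h5, h4, h3, h2]

-- ===== VERDICT (by name: the statement is the Claim_ definition above) =====
theorem convert_ships_and_notations_dictionary_to_ship_names_and_notations_spec : Claim_equal_convert_ships_and_notations_dictionary_to_ship_names_and_notations := by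
  intro dic _
  show _ = _
  unfold convert_ships_and_notations_dictionary_to_ship_names_and_notations
  unfold convert_ships_and_notations_dictionary_to_ship_names_and_notations_alt
  show (dic.foldl pvStepA (PySem.Dict.ofList [("Carrier", []), ("Battleship", []), ("Cruiser", []), ("Submarine", []), ("Destroyer", [])], false)).1.items
      = [("Carrier", ((dic.map (·.2)).filter (fun v => v.length == 5)).getLast?.getD []),
         ("Battleship", ((dic.map (·.2)).filter (fun v => v.length == 4)).getLast?.getD []),
         ("Cruiser", if ((dic.map (·.2)).filter (fun v => v.length == 3)).length ≥ 2 then ((dic.map (·.2)).filter (fun v => v.length == 3)).getLast?.getD [] else []),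
         ("Submarine", ((dic.map (·.2)).filter (fun v => v.length == 3)).head?.getD []),
         ("Destroyer", ((dic.map (·.2)).filter (fun v => v.length == 2)).getLast?.getD [])]
  rw [show PySem.Dict.ofList ([("Carrier", ([] : List Int)), ("Battleship", []), ("Cruiser", []), ("Submarine", []), ("Destroyer", [])]) = PySem.Dict.mk [("Carrier", []), ("Battleship", []), ("Cruiser", []), ("Submarine", []), ("Destroyer", [])] from by decide]
  rw [pvLoopA]
  show [_, _, ("Cruiser", _), ("Submarine", _), _] = _
  simp only [pvThrees, Bool.false_eq_true, if_false]
  rcases h : (dic.map (·.2)).filter (fun v => v.length == 3) with _ | ⟨x, t⟩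
  · rw [h]
    simp [pvLastD]
  · rcases t with _ | ⟨y, t'⟩
    · rw [h]
      simp [pvLastD]
    · rw [h]
      have h2 : (x :: y :: t').length ≥ 2 := by simp
      rw [if_pos h2]
      simp [pvLastD, List.getLast?_cons_cons]
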